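-- pv_equiv track=rewrite | github.com/Chasoso/isbn-library | backend/lambda/shared/python/shared/voronoi_export.py | build_slot_fill_order
-- ===== SOURCE A (Python) =====
-- def build_slot_fill_order(count: int) -> list[int]:
--     if count <= 2:
--         return list(range(count))
--
--     center_left = (count - 1) // 2
--     center_right = count // 2
--     order: list[int] = []
--     if center_left == center_right:
--         order.append(center_left)
--     else:
--         order.extend([center_left, center_right])
--
--     left = 0
--     right = count - 1
--     while len(order) < count:
--         if left not in order:
--             order.append(left)
--         if right not in order and len(order) < count:
--             order.append(right)
--         left += 1
--         right -= 1
--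
--     return order[:count]
-- ===== SOURCE B (Python) =====
-- def build_slot_fill_order(count: int) -> list[int]:
--     if count <= 2:
--         return list(range(count))
--     center_left = (count - 1) // 2
--     center_right = count // 2
--     order = [center_left] if center_left == center_right else [center_left, center_right]
--     for i in range(center_left):
--         order.append(i)
--         order.append(count - 1 - i)
--     return order
-- ===== Notes on version B (the rewrite author's own statement) =====
-- stated objective: simpler
-- what changed: Replaced the while loop with repeated 'not in order' membership scans and two moving pointers by a direct construction: the center slot(s) followed by a single for-loop emitting each symmetric pair (i, count-1-i).
import Mathlib
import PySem

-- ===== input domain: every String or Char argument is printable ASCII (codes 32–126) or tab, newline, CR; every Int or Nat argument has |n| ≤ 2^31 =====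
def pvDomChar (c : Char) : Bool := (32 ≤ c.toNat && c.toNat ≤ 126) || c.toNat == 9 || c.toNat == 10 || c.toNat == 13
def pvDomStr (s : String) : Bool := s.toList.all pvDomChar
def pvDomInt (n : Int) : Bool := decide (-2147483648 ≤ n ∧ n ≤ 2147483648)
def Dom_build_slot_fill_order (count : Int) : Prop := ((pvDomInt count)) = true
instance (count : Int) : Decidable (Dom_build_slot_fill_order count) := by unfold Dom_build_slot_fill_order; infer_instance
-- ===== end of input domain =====

-- B is simpler: it builds the order directly (centers, then each symmetric pair) instead of A's
-- while loop with membership scans; equivalence is proved for every count (both are total).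

-- ===== PORT A =====
-- the while loop of A; fuel = count.toNat is enough (the loop runs at most (count-1)//2 + 1 times)
def buildLoopA (count : Int) : Nat → List Int → Int → Int → List Int
  | 0, order, _, _ => order
  | fuel+1, order, left, right =>
    if (order.length : Int) < count then
      let o1 := if order.contains left then order else order ++ [left]
      let o2 := if o1.contains right = false ∧ (o1.length : Int) < count then o1 ++ [right] else o1
      buildLoopA count fuel o2 (left + 1) (right - 1)
    else order

def build_slot_fill_order (count : Int) : List Int :=
  if count ≤ 2 then PySem.List.pyRange 0 count 1
  else
    let center_left := PySem.Int.floordiv (count - 1) 2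
    let center_right := PySem.Int.floordiv count 2
    let order : List Int :=
      if center_left == center_right then [center_left] else [center_left, center_right]
    let order := buildLoopA count count.toNat order 0 (count - 1)
    PySem.List.slice order none (some count)

-- ===== PORT B =====
def build_slot_fill_order_alt (count : Int) : List Int :=
  if count ≤ 2 then PySem.List.pyRange 0 count 1
  else
    let center_left := PySem.Int.floordiv (count - 1) 2
    let center_right := PySem.Int.floordiv count 2
    let order : List Int :=
      if center_left == center_right then [center_left] else [center_left, center_right]
    (PySem.List.pyRange 0 center_left 1).foldl
      (fun o i => (o ++ [i]) ++ [count - 1 - i]) order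

-- ===== PRECONDITION & SPEC =====
def Spec_build_slot_fill_order (count : Int) (out : List Int) : Prop := out = build_slot_fill_order_alt count
instance (count : Int) (out : List Int) : Decidable (Spec_build_slot_fill_order count out) := by unfold Spec_build_slot_fill_order; infer_instance

-- ===== CLAIM (what is proved, stated in full; the proofs are below) =====
def Claim_equal_build_slot_fill_order : Prop := ∀ (count : Int), Dom_build_slot_fill_order count → Spec_build_slot_fill_order count (build_slot_fill_order count)

-- ===== LEMMAS AND PROOFS =====

-- the symmetric pairs emitted by both programs after the center(s)
def pairsP (count : Int) (i : Nat) : List Int :=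
  (List.range i).flatMap (fun k => [(k : Int), count - 1 - (k : Int)])

lemma pairsP_succ (count : Int) (i : Nat) :
    pairsP count (i + 1) = pairsP count i ++ [(i : Int), count - 1 - (i : Int)] := by
  simp [pairsP, List.range_succ]

lemma length_pairsP (count : Int) (i : Nat) : (pairsP count i).length = 2 * i := by
  induction i with
  | zero => simp [pairsP]
  | succ n ih => simp [pairsP_succ, ih]; omega

lemma mem_pairsP (count : Int) (i : Nat) (x : Int) :
    x ∈ pairsP count i ↔ ∃ k : Nat, k < i ∧ (x = (k : Int) ∨ x = count - 1 - (k : Int)) := by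
  simp [pairsP]

lemma loopA_eq (count cl cr : Int) (init : List Int)
    (hcl : cl * 2 ≤ count - 1 ∧ count - 1 < (cl + 1) * 2)
    (hcr : cr * 2 ≤ count ∧ count < (cr + 1) * 2)
    (hinit : init = if cl == cr then [cl] else [cl, cr]) :
    ∀ (fuel i : Nat), (i : Int) ≤ cl → cl.toNat - i < fuel →
      buildLoopA count fuel (init ++ pairsP count i) i (count - 1 - i)
        = init ++ pairsP count cl.toNat := by
  have hL : (init.length : Int) + 2 * cl = count := by
    by_cases h : cl = cr
    · simp [hinit, h]; omega
    · have : (cl == cr) = false := by simp [h]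
      simp [hinit, this]; omega
  intro fuel
  induction fuel with
  | zero => intro i _ h; omega
  | succ f ih =>
    intro i hi hfuel
    by_cases hlt : (i : Int) < cl
    · -- loop body runs and appends both i and count-1-i
      have hlen : ((init ++ pairsP count i).length : Int) < count := by
        rw [List.length_append, length_pairsP]; push_cast; omega
      have hmemL : (i : Int) ∉ init ++ pairsP count i := by
        simp only [List.mem_append, mem_pairsP]
        rintro (hin | ⟨k, hk, hx | hx⟩)
        · by_cases h : cl = cr
          · simp [hinit, h] at hin; omega
          · have hb : (cl == cr) = false := by simp [h]
            simp [hinit, hb] at hin; rcases hin with h1 | h1 <;> omega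
        · omega
        · omega
      have hmemR : (count - 1 - (i : Int)) ∉ init ++ pairsP count i := by
        simp only [List.mem_append, mem_pairsP]
        rintro (hin | ⟨k, hk, hx | hx⟩)
        · by_cases h : cl = cr
          · simp [hinit, h] at hin; omega
          · have hb : (cl == cr) = false := by simp [h]
            simp [hinit, hb] at hin; rcases hin with h1 | h1 <;> omega
        · omega
        · omega
      rw [buildLoopA]
      simp only [if_pos hlen]
      have hc1 : (init ++ pairsP count i).contains (i : Int) = false := by
        simpa using hmemL
      have hc2 : ((init ++ pairsP count i) ++ [(i : Int)]).contains (count - 1 - (i : Int)) = false := by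
        have hnot : ¬ ((count - 1 - (i : Int)) ∈ init ++ pairsP count i ∨ (count - 1 - (i : Int)) = (i : Int)) := by
          rintro (h | h)
          · exact hmemR h
          · omega
        simpa [and_assoc] using hnot
      have hlen2 : (((init ++ pairsP count i) ++ [(i : Int)]).length : Int) < count := by
        simp only [List.length_append, length_pairsP, List.length_cons, List.length_nil]
        push_cast; omega
      simp only [hc1, Bool.false_eq_true, if_false]
      rw [if_pos (And.intro hc2 hlen2)]
      have hre : ((init ++ pairsP count i) ++ [(i : Int)]) ++ [count - 1 - (i : Int)]
          = init ++ pairsP count (i + 1) := by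
        simp [pairsP_succ]
      rw [hre]
      have := ih (i + 1) (by push_cast; omega) (by omega)
      have harg : (i : Int) + 1 = ((i + 1 : Nat) : Int) := by push_cast; ring
      have harg2 : count - 1 - (i : Int) - 1 = count - 1 - ((i + 1 : Nat) : Int) := by push_cast; ring
      rw [harg, harg2]
      exact this
    · -- i = cl : the guard fails, the loop returns
      have hieq : (i : Int) = cl := by omega
      have hieq' : i = cl.toNat := by omega
      rw [buildLoopA]
      have hlen : ¬ ((init ++ pairsP count i).length : Int) < count := by
        rw [List.length_append, length_pairsP]; push_cast; omega
      simp only [if_neg hlen]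
      rw [hieq']

lemma foldB_eq (count : Int) (init : List Int) (n : Nat) :
    (((List.range n).map (fun k : Nat => ((0 : Int) + (k : Int)))).foldl
        (fun o i => (o ++ [i]) ++ [count - 1 - i]) init)
      = init ++ pairsP count n := by
  induction n with
  | zero => simp [pairsP]
  | succ m ih =>
    rw [List.range_succ, List.map_append, List.foldl_append, ih, pairsP_succ]
    simp

lemma main_eq (count : Int) : build_slot_fill_order count = build_slot_fill_order_alt count := by
  unfold build_slot_fill_order build_slot_fill_order_alt
  by_cases h : count ≤ 2
  · simp [h]
  · simp only [if_neg h]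
    set cl := PySem.Int.floordiv (count - 1) 2 with hcl_def
    set cr := PySem.Int.floordiv count 2 with hcr_def
    have hcl : cl * 2 ≤ count - 1 ∧ count - 1 < (cl + 1) * 2 :=
      (PySem.Int.floordiv_eq_iff_of_pos (by norm_num)).mp hcl_def.symm
    have hcr : cr * 2 ≤ count ∧ count < (cr + 1) * 2 :=
      (PySem.Int.floordiv_eq_iff_of_pos (by norm_num)).mp hcr_def.symm
    set init : List Int := if cl == cr then [cl] else [cl, cr] with hinit
    have hloop := loopA_eq count cl cr init hcl hcr hinit count.toNat 0
      (by omega) (by omega)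
    have h0 : init ++ pairsP count 0 = init := by simp [pairsP]
    rw [h0] at hloop
    norm_num at hloop
    rw [hloop]
    have hLinit : (init.length : Int) + 2 * cl = count := by
      by_cases hq : cl = cr
      · simp [hinit, hq]; omega
      · have hb : (cl == cr) = false := by simp [hq]
        simp [hinit, hb]; omega
    have hslice : PySem.List.slice (init ++ pairsP count cl.toNat) none (some count)
        = init ++ pairsP count cl.toNat := by
      rw [PySem.List.slice_to _ (by omega)]
      apply List.take_of_length_le
      simp only [List.length_append, length_pairsP]
      omega
    rw [hslice]
    rw [PySem.List.pyRange_one]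
    have : (cl - 0).toNat = cl.toNat := by omega
    rw [this, foldB_eq]

-- ===== VERDICT (by name: the statement is the Claim_ definition above) =====
theorem build_slot_fill_order_spec : Claim_equal_build_slot_fill_order := by
  intro count _
  exact main_eq count
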